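-- pv_equiv track=rewrite | github.com/jack-dolan/advent-of-code-2020 | 15/elfgame.py | get_next_spoken_number
-- ===== SOURCE A (Python) =====
-- def get_next_spoken_number(list_of_spoken_numbers):
--     most_recently_spoken_number = list_of_spoken_numbers[-1]
--     if (list_of_spoken_numbers.count(most_recently_spoken_number) == 1):
--         return 0
--     else:
--         for i_index, i_value in enumerate(reversed(list_of_spoken_numbers[:-1])):
--             if i_value == most_recently_spoken_number:
--                 return i_index + 1
-- ===== SOURCE B (Python) =====
-- def get_next_spoken_number(list_of_spoken_numbers):
--     last = list_of_spoken_numbers[-1]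
--     last_seen = {}
--     for i, v in enumerate(list_of_spoken_numbers[:-1]):
--         last_seen[v] = i
--     if last in last_seen:
--         return len(list_of_spoken_numbers) - 1 - last_seen[last]
--     return 0
-- ===== Notes on version B (the rewrite author's own statement) =====
-- stated objective: alternative
-- what changed: Replaced the count() pass plus backward reversed-slice scan by a single forward pass that builds a last-seen index dictionary over the prefix and answers with one lookup.
import Mathlib
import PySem

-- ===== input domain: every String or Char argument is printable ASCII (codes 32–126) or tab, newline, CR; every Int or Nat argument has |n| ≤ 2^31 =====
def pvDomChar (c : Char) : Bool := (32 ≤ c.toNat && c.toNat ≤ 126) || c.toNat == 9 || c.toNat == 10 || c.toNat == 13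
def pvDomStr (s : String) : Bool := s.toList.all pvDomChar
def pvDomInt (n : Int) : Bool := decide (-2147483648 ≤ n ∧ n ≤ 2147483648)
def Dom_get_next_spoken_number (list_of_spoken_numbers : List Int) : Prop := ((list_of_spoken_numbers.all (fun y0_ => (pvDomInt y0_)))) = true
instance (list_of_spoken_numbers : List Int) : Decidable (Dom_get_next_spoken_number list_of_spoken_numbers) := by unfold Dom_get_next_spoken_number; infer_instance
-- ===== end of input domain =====

-- B replaces A's count() pass + backward reversed-slice scan by one forward pass building a
-- last-seen index dictionary over the prefix, answered by a single lookup (alternative, same cost).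

-- ===== PORT A =====
-- the 'for i_index, i_value in enumerate(reversed(...))' loop; fallthrough (Python's implicit None) is unreachable under Pre_
def aScan : List Int → Int → Nat → Int
  | [], _, _ => 0
  | v :: rest, m, i => if v = m then (i : Int) + 1 else aScan rest m (i + 1)

def get_next_spoken_number (list_of_spoken_numbers : List Int) : Int :=
  match PySem.List.pyGet? list_of_spoken_numbers (-1) with
  | none => 0  -- IndexError in Python (empty list); excluded by Pre_
  | some m =>
    if PySem.List.count list_of_spoken_numbers m = 1 then 0
    else aScan (PySem.List.slice list_of_spoken_numbers none (some (-1))).reverse m 0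

-- ===== PORT B =====
-- the 'for i, v in enumerate(xs[:-1]): last_seen[v] = i' loop
def bBuild (p : List Int) : PySem.Dict Int Int :=
  (PySem.List.enumerate p).foldl (fun d q => d.insert q.2 q.1) PySem.Dict.empty

def get_next_spoken_number_alt (list_of_spoken_numbers : List Int) : Int :=
  match PySem.List.pyGet? list_of_spoken_numbers (-1) with
  | none => 0  -- IndexError in Python (empty list); excluded by Pre_
  | some last =>
    let seen := bBuild (PySem.List.slice list_of_spoken_numbers none (some (-1)))
    if seen.contains last then
      (list_of_spoken_numbers.length : Int) - 1 - seen.getD last 0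
    else 0

-- ===== PRECONDITION & SPEC =====
-- Pre_ excludes only the empty list, on which both Pythons raise IndexError at xs[-1].
def Pre_get_next_spoken_number (list_of_spoken_numbers : List Int) : Prop :=
  list_of_spoken_numbers ≠ []
instance (list_of_spoken_numbers : List Int) : Decidable (Pre_get_next_spoken_number list_of_spoken_numbers) := by unfold Pre_get_next_spoken_number; infer_instance

def pvWitness_get_next_spoken_number : List Int := [0, 3, 6, 0]

def Spec_get_next_spoken_number (list_of_spoken_numbers : List Int) (out : Int) : Prop := out = get_next_spoken_number_alt list_of_spoken_numbers
instance (list_of_spoken_numbers : List Int) (out : Int) : Decidable (Spec_get_next_spoken_number list_of_spoken_numbers out) := by unfold Spec_get_next_spoken_number; infer_instance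

-- ===== CLAIM =====
def Claim_equal_get_next_spoken_number : Prop := ∀ (list_of_spoken_numbers : List Int), Dom_get_next_spoken_number list_of_spoken_numbers → Pre_get_next_spoken_number list_of_spoken_numbers → Spec_get_next_spoken_number list_of_spoken_numbers (get_next_spoken_number list_of_spoken_numbers)

-- ===== LEMMAS AND PROOFS =====

-- first-occurrence index, the common characterisation both ports are reduced to
def fidx : List Int → Int → Option Nat
  | [], _ => none
  | v :: r, m => if v = m then some 0 else (fidx r m).map (· + 1)

theorem fidx_eq_none_iff (l : List Int) (m : Int) : fidx l m = none ↔ m ∉ l := by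
  induction l with
  | nil => simp [fidx]
  | cons v r ih =>
    by_cases hv : v = m
    · simp [fidx, hv]
    · simp [fidx, hv, Option.map_eq_none_iff, ih, Ne.symm hv]

theorem aScan_eq_fidx (l : List Int) (m : Int) (i : Nat) :
    aScan l m i = match fidx l m with | some k => (i : Int) + k + 1 | none => 0 := by
  induction l generalizing i with
  | nil => rfl
  | cons v r ih =>
    by_cases hv : v = m
    · simp [aScan, fidx, hv]
    · simp only [aScan, fidx, if_neg hv, ih (i + 1)]
      cases fidx r m with
      | none => rfl
      | some k => simp; ring

theorem bBuild_get? (p : List Int) (m : Int) :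
    (bBuild p).get? m = (fidx p.reverse m).map (fun k : Nat => (p.length : Int) - 1 - (k : Int)) := by
  induction p using List.reverseRecOn with
  | nil => simp [bBuild, fidx, PySem.List.enumerate_nil]
  | append_singleton q v ih =>
    have hb : bBuild (q ++ [v]) = (bBuild q).insert v (q.length : Int) := by
      simp [bBuild, PySem.List.enumerate_append, List.foldl_append, PySem.List.enumerate_cons,
        PySem.List.enumerate_nil]
    rw [hb, PySem.Dict.get?_insert]
    by_cases hm : m = v
    · simp [hm, fidx]
    · rw [if_neg hm]
      have hv : v ≠ m := fun h => hm h.symm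
      simp only [List.reverse_append, List.reverse_singleton, List.singleton_append, fidx,
        if_neg hv, ih, Option.map_map]
      cases fidx q.reverse m with
      | none => rfl
      | some k =>
        simp only [Option.map_some, Function.comp, List.length_append, List.length_cons,
          List.length_nil]
        congr 1
        push_cast
        ring

-- ===== VERDICT =====
theorem get_next_spoken_number_spec : Claim_equal_get_next_spoken_number := by
  intro xs _ hne
  obtain ⟨p, m, rfl⟩ : ∃ p m, xs = p ++ [m] :=
    ⟨xs.dropLast, xs.getLast hne, (List.dropLast_append_getLast hne).symm⟩
  unfold Spec_get_next_spoken_number get_next_spoken_number get_next_spoken_number_alt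
  rw [PySem.List.pyGet?_neg_one_append_singleton]
  simp only [PySem.List.slice_to_neg_one, List.dropLast_concat]
  have hcount : PySem.List.count (p ++ [m]) m = p.count m + 1 := by
    simp [PySem.List.count_eq]
  have hget := bBuild_get? p m
  have hcontains : (bBuild p).contains m = ((bBuild p).get? m).isSome :=
    PySem.Dict.contains_eq_isSome_get? _ _
  rw [hcount, hcontains, hget]
  by_cases hmem : m ∈ p
  · have hc1 : p.count m + 1 ≠ 1 := by
      have := List.count_pos_iff.mpr hmem
      omega
    rw [if_neg hc1, aScan_eq_fidx]
    obtain ⟨k, hk⟩ : ∃ k, fidx p.reverse m = some k := by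
      cases hf : fidx p.reverse m with
      | none => exact absurd ((fidx_eq_none_iff _ _).mp hf) (by simpa using hmem)
      | some k => exact ⟨k, rfl⟩
    rw [PySem.Dict.getD_eq_get?_getD, hget, hk]
    simp only [Option.map_some, Option.isSome_some, if_true, Option.getD_some,
      List.length_append, List.length_cons, List.length_nil]
    push_cast
    ring
  · have hc0 : p.count m = 0 := List.count_eq_zero.mpr hmem
    have hf : fidx p.reverse m = none := (fidx_eq_none_iff _ _).mpr (by simpa using hmem)
    simp [hc0, hf]
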